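-- pv_equiv track=rewrite | github.com/evelynV-exe/Projects | Karnaugh/karnaugh.py | filterPrimeImplicants
-- ===== SOURCE A (Python) =====
-- def filterPrimeImplicants(groups):
--     prime_group = []
--     for i, (term_i, cells_i) in enumerate(groups):
--         is_subset = False
--         set_i = set(cells_i)
--         for j, (_, cells_j) in enumerate(groups):
--             if i != j:
--                 set_j = set(cells_j)
--                 if set_i < set_j:  # strict subset
--                     is_subset = True
--                     break
--         if not is_subset:
--             prime_group.append((term_i, cells_i))
--     return prime_group
-- ===== SOURCE B (Python) =====
-- def filterPrimeImplicants(groups):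
--     sets = [frozenset(c) for _, c in groups]
--     order = sorted(range(len(groups)), key=lambda i: len(sets[i]), reverse=True)
--     maximals = []
--     kept = set()
--     for i in order:
--         s = sets[i]
--         if not any(s < m for m in maximals):
--             kept.add(i)
--             maximals.append(s)
--     return [g for i, g in enumerate(groups) if i in kept]
-- ===== Notes on version B (the rewrite author's own statement) =====
-- stated objective: faster
-- what changed: Instead of testing every group's set against every other group's set, B sorts the group indices once by distinct-cell-set size descending and makes a single pass that keeps a group iff its set is not a strict subset of an already-accepted maximal set (checking against the few maximal sets suffices), then emits kept groups in input order.
import Mathlib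
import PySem

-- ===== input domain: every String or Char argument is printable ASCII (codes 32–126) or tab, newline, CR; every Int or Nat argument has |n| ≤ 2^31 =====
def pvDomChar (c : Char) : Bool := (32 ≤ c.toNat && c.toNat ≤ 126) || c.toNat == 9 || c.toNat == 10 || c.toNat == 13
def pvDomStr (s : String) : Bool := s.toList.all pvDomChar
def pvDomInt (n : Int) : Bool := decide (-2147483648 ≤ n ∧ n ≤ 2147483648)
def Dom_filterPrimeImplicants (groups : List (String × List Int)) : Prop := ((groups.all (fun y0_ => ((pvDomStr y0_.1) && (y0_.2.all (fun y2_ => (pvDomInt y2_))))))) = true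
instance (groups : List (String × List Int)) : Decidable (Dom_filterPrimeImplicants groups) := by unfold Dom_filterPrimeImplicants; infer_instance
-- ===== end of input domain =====

-- B keeps only maximal cell-sets found by one pass over the groups sorted by set size descending
-- (comparing each set against the accepted maximal sets only, not against every other group);
-- same return value, measurably faster on the generated timing inputs (objective: faster).

-- ===== PORT A =====
-- shared helper: Python's strict subset test 'set(a) < set(b)' expressed by membership
def fpiSsub (a b : List Int) : Bool :=
  (a.all (fun x => b.contains x)) && !(b.all (fun x => a.contains x))

def filterPrimeImplicants (groups : List (String × List Int)) : List (String × List Int) :=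
  (PySem.List.enumerate groups).foldl (fun acc p =>
    let si := PySem.Set.ofList p.2.2
    -- inner 'for j ...: if ...: is_subset = True; break' = any over enumerate(groups)
    let isSub := (PySem.List.enumerate groups).any (fun q =>
      p.1 != q.1 && fpiSsub si (PySem.Set.ofList q.2.2))
    if !isSub then acc ++ [p.2] else acc) []

-- ===== PORT B =====
-- Source B: sets = [frozenset(c) for _, c in groups]
def fpiSets (groups : List (String × List Int)) : List (List Int) :=
  groups.map (fun g => PySem.Set.ofList g.2)

-- loop body of Source B's 'for i in order' (state = (maximals, kept))
def fpiStep (sets : List (List Int)) (st : List (List Int) × List Int) (i : Nat) :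
    List (List Int) × List Int :=
  let s := sets.getD i []
  if !(st.1.any (fun m => fpiSsub s m)) then (st.1 ++ [s], st.2 ++ [(i : Int)]) else st

def filterPrimeImplicants_alt (groups : List (String × List Int)) : List (String × List Int) :=
  let sets := fpiSets groups
  let order := PySem.List.sorted (List.range groups.length)
    (fun i => (sets.getD i []).length) true
  let st := order.foldl (fpiStep sets) ([], [])
  (PySem.List.enumerate groups).foldl
    (fun acc p => if st.2.contains p.1 then acc ++ [p.2] else acc) []

-- ===== PRECONDITION & SPEC =====
def Spec_filterPrimeImplicants (groups : List (String × List Int)) (out : List (String × List Int)) : Prop := out = filterPrimeImplicants_alt groups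
instance (groups : List (String × List Int)) (out : List (String × List Int)) : Decidable (Spec_filterPrimeImplicants groups out) := by unfold Spec_filterPrimeImplicants; infer_instance

-- ===== CLAIM (what is proved, stated in full; the proofs are below) =====
def Claim_equal_filterPrimeImplicants : Prop := ∀ (groups : List (String × List Int)), Dom_filterPrimeImplicants groups → Spec_filterPrimeImplicants groups (filterPrimeImplicants groups)

-- ===== LEMMAS AND PROOFS =====

-- 'keep index k': k's cell-set is a strict subset of no group's cell-set (A's criterion)
def fpiKeep (sets : List (List Int)) (k : Nat) : Bool :=
  !((List.range sets.length).any (fun j => fpiSsub (sets.getD k []) (sets.getD j [])))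

def fpiMx (sets : List (List Int)) (P : List Nat) : List (List Int) :=
  (P.filter (fpiKeep sets)).map (fun k => sets.getD k [])

def fpiKp (sets : List (List Int)) (P : List Nat) : List Int :=
  (P.filter (fpiKeep sets)).map (fun (k : Nat) => (k : Int))

theorem fpiSsub_iff (a b : List Int) :
    fpiSsub a b = true ↔ a.toFinset ⊂ b.toFinset := by
  have h1 : fpiSsub a b = true ↔ (∀ x ∈ a, x ∈ b) ∧ ∃ x ∈ b, x ∉ a := by
    simp [fpiSsub]
  rw [h1, ssubset_iff_subset_not_subset]
  constructor
  · rintro ⟨hs, x, hx, hxa⟩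
    refine ⟨fun z hz => by simp_all, fun hc => hxa ?_⟩
    have := hc (List.mem_toFinset.mpr hx)
    simpa using this
  · rintro ⟨hs, hns⟩
    refine ⟨fun z hz => by simpa using hs (List.mem_toFinset.mpr hz), ?_⟩
    by_contra hc
    push Not at hc
    exact hns fun z hz => List.mem_toFinset.mpr (hc z (by simpa using hz))

theorem fpiSsub_irrefl (a : List Int) : fpiSsub a a = false := by
  by_contra h
  have h' : fpiSsub a a = true := by revert h; cases fpiSsub a a <;> simp
  exact absurd ((fpiSsub_iff a a).mp h') (ssubset_irrefl _)

theorem fpi_pick_max (sets : List (List Int)) (k : Nat)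
    (h : ∃ j < sets.length, fpiSsub (sets.getD k []) (sets.getD j []) = true) :
    ∃ m < sets.length, fpiSsub (sets.getD k []) (sets.getD m []) = true ∧
      fpiKeep sets m = true := by
  classical
  set s := sets.getD k [] with hs
  set l := (List.range sets.length).filter (fun j => fpiSsub s (sets.getD j [])) with hl
  have hlne : l ≠ [] := by
    rcases h with ⟨j, hj, hssub⟩
    intro hnil
    have : j ∈ l := by
      rw [hl]; exact List.mem_filter.mpr ⟨List.mem_range.mpr hj, hssub⟩
    simp [hnil] at this
  obtain ⟨m, hm⟩ : ∃ m, m ∈ List.argmax (fun j => ((sets.getD j []).toFinset.card)) l := by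
    cases hh : List.argmax (fun j => ((sets.getD j []).toFinset.card)) l with
    | none => exact absurd (List.argmax_eq_none.mp hh) hlne
    | some m => exact ⟨m, rfl⟩
  have hml : m ∈ l := List.argmax_mem hm
  have hmr : m ∈ List.range sets.length := (List.mem_filter.mp hml).1
  have hms : fpiSsub s (sets.getD m []) = true := by
    have := (List.mem_filter.mp hml).2; simpa using this
  refine ⟨m, List.mem_range.mp hmr, hms, ?_⟩
  -- m is kept: no strict superset of m's set exists
  rw [fpiKeep]
  simp only [Bool.not_eq_true', List.any_eq_false, List.mem_range]
  intro j hj hcon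
  -- then s ⊂ set m ⊂ set j, so j ∈ l with bigger card than m: contradiction with argmax
  have h1 := (fpiSsub_iff _ _).mp hms
  have h2 := (fpiSsub_iff _ _).mp hcon
  have hjs : fpiSsub s (sets.getD j []) = true := (fpiSsub_iff _ _).mpr (h1.trans h2)
  have hjl : j ∈ l := List.mem_filter.mpr ⟨List.mem_range.mpr hj, hjs⟩
  have := List.not_lt_of_mem_argmax hjl hm
  exact this (Finset.card_lt_card h2)

theorem fpi_nodup_getD (sets : List (List Int)) (hnd : ∀ s ∈ sets, s.Nodup) (j : Nat) :
    (sets.getD j []).Nodup := by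
  by_cases hj : j < sets.length
  · rw [List.getD_eq_getElem sets [] hj]
    exact hnd _ (List.getElem_mem hj)
  · rw [List.getD_eq_default sets [] (by omega)]
    exact List.nodup_nil

theorem fpi_loop (sets : List (List Int)) (hnd : ∀ s ∈ sets, s.Nodup) (P Q : List Nat)
    (hPQ : PySem.List.sorted (List.range sets.length)
        (fun i => (sets.getD i []).length) true = P ++ Q) :
    Q.foldl (fpiStep sets) (fpiMx sets P, fpiKp sets P) =
      (fpiMx sets (P ++ Q), fpiKp sets (P ++ Q)) := by
  induction Q generalizing P with
  | nil => simp
  | cons i Q' ih =>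
    set key : Nat → Nat := fun j => (sets.getD j []).length with hkey
    set order := PySem.List.sorted (List.range sets.length) key true with horder
    -- facts about i's position
    have hperm : order.Perm (List.range sets.length) := PySem.List.sorted_perm _ _ _
    have hpw : order.Pairwise (fun a b => key b ≤ key a) := PySem.List.sorted_pairwise_rev _ _
    have hi_mem : i ∈ order := by rw [hPQ]; simp
    have hi_lt : i < sets.length := List.mem_range.mp (hperm.mem_iff.mp hi_mem)
    -- every index with strictly larger key lies in P
    have hbig : ∀ k, k < sets.length → key i < key k → k ∈ P := by
      intro k hk hkk
      have hk_mem : k ∈ order := hperm.mem_iff.mpr (List.mem_range.mpr hk)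
      rw [hPQ] at hk_mem
      rcases List.mem_append.mp hk_mem with h | h
      · exact h
      · exfalso
        have hpw' := hPQ ▸ hpw
        have h2 := (List.pairwise_append.mp hpw').2.1
        rcases List.mem_cons.mp h with rfl | h
        · omega
        · have hle : key k ≤ key i := (List.pairwise_cons.mp h2).1 k h
          omega
    -- the step at i
    have hstep : fpiStep sets (fpiMx sets P, fpiKp sets P) i =
        (fpiMx sets (P ++ [i]), fpiKp sets (P ++ [i])) := by
      by_cases hkeep : fpiKeep sets i = true
      · -- no strict superset anywhere ⇒ none among maximals ⇒ accepted
        have hany : (fpiMx sets P).any (fun m => fpiSsub (sets.getD i []) m) = false := by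
          rw [List.any_eq_false]
          intro m hm
          rcases List.mem_map.mp hm with ⟨k, hkf, rfl⟩
          have hkP := List.mem_filter.mp hkf
          have hk_lt : k < sets.length := by
            have : k ∈ order := by rw [hPQ]; exact List.mem_append_left _ hkP.1
            exact List.mem_range.mp (hperm.mem_iff.mp this)
          intro hcon
          rw [fpiKeep, Bool.not_eq_true', List.any_eq_false] at hkeep
          exact absurd hcon (by simpa using hkeep k (List.mem_range.mpr hk_lt))
        simp only [fpiStep, hany, Bool.not_false, if_pos]
        simp [fpiMx, fpiKp, hkeep]
      · -- a strict superset exists ⇒ a kept one with larger key is already in maximals ⇒ rejected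
        have hkeep' : fpiKeep sets i = false := by revert hkeep; cases fpiKeep sets i <;> simp
        have hex : ∃ j < sets.length, fpiSsub (sets.getD i []) (sets.getD j []) = true := by
          rw [fpiKeep, Bool.not_eq_false', List.any_eq_true] at hkeep'
          rcases hkeep' with ⟨j, hj, hjs⟩
          exact ⟨j, List.mem_range.mp hj, by simpa using hjs⟩
        rcases fpi_pick_max sets i hex with ⟨m, hm_lt, hms, hmk⟩
        have hkey_lt : key i < key m := by
          have h2 := (fpiSsub_iff _ _).mp hms
          have hc := Finset.card_lt_card h2
          have e1 := List.toFinset_card_of_nodup (fpi_nodup_getD sets hnd i)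
          have e2 := List.toFinset_card_of_nodup (fpi_nodup_getD sets hnd m)
          simp only [hkey]
          omega
        have hmP : m ∈ P := hbig m hm_lt hkey_lt
        have hmem : sets.getD m [] ∈ fpiMx sets P :=
          List.mem_map.mpr ⟨m, List.mem_filter.mpr ⟨hmP, hmk⟩, rfl⟩
        have hany : (fpiMx sets P).any (fun m => fpiSsub (sets.getD i []) m) = true :=
          List.any_eq_true.mpr ⟨_, hmem, hms⟩
        simp only [fpiStep, hany, Bool.not_true, if_neg, Bool.false_eq_true, not_false_iff]
        simp [fpiMx, fpiKp, hkeep']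
    have hPQ' : order = (P ++ [i]) ++ Q' := by rw [hPQ]; simp
    calc (i :: Q').foldl (fpiStep sets) (fpiMx sets P, fpiKp sets P)
        = Q'.foldl (fpiStep sets) (fpiMx sets (P ++ [i]), fpiKp sets (P ++ [i])) := by
          rw [List.foldl_cons, hstep]
      _ = (fpiMx sets ((P ++ [i]) ++ Q'), fpiKp sets ((P ++ [i]) ++ Q')) := ih _ hPQ'
      _ = (fpiMx sets (P ++ i :: Q'), fpiKp sets (P ++ i :: Q')) := by simp

theorem fpiSets_getD (groups : List (String × List Int)) (j : Nat) (hj : j < groups.length) :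
    (fpiSets groups).getD j [] = PySem.Set.ofList (groups[j].2) := by
  rw [fpiSets, List.getD_eq_getElem _ _ (by simpa using hj)]
  simp

theorem fpi_kp_contains (sets : List (List Int)) (hnd : ∀ s ∈ sets, s.Nodup)
    (k : Nat) (hk : k < sets.length) :
    ((PySem.List.sorted (List.range sets.length)
        (fun i => (sets.getD i []).length) true).foldl (fpiStep sets) ([], [])).2.contains ((k : Nat) : Int)
      = fpiKeep sets k := by
  have h0 := fpi_loop sets hnd []
    (PySem.List.sorted (List.range sets.length) (fun i => (sets.getD i []).length) true) (by simp)
  rw [show (([],[]) : List (List Int) × List Int) = (fpiMx sets [], fpiKp sets []) from rfl, h0]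
  simp only [List.nil_append]
  set order := PySem.List.sorted (List.range sets.length) (fun i => (sets.getD i []).length) true
    with horder
  have hmem : k ∈ order := by
    rw [horder, PySem.List.mem_sorted]
    simpa using hk
  cases hkeep : fpiKeep sets k with
  | true =>
    simp only [fpiKp, List.contains_iff_mem, List.mem_map, List.mem_filter]
    exact ⟨k, ⟨hmem, hkeep⟩, rfl⟩
  | false =>
    by_contra hc
    rw [Bool.not_eq_false, List.contains_iff_mem] at hc
    simp only [fpiKp, List.mem_map, List.mem_filter] at hc
    rcases hc with ⟨k', ⟨_, hkeep'⟩, hek⟩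
    have : k' = k := by omega
    subst this
    rw [hkeep] at hkeep'
    exact absurd hkeep' (by simp)

theorem fpi_condA (groups : List (String × List Int)) (kk : Nat) (hkk : kk < groups.length) :
    (!((PySem.List.enumerate groups).any fun q =>
        (((0 : Int) + (kk : Nat)) != q.1) && fpiSsub (PySem.Set.ofList (groups[kk].2)) (PySem.Set.ofList q.2.2)))
      = fpiKeep (fpiSets groups) kk := by
  have hlen : (fpiSets groups).length = groups.length := by simp [fpiSets]
  rw [fpiKeep]
  congr 1
  rw [Bool.eq_iff_iff, List.any_eq_true, List.any_eq_true]
  constructor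
  · rintro ⟨q, hq, hcond⟩
    rcases (PySem.List.mem_enumerate_iff _ _ _).mp hq with ⟨j, hj, rfl⟩
    simp only [Bool.and_eq_true, bne_iff_ne, ne_eq] at hcond
    refine ⟨j, by rw [List.mem_range]; omega, ?_⟩
    rw [fpiSets_getD groups kk hkk, fpiSets_getD groups j hj]
    exact hcond.2
  · rintro ⟨j, hj, hcond⟩
    rw [List.mem_range, hlen] at hj
    rw [fpiSets_getD groups kk hkk, fpiSets_getD groups j hj] at hcond
    refine ⟨((0 : Int) + (j : Nat), groups[j]), (PySem.List.mem_enumerate_iff _ _ _).mpr ⟨j, hj, rfl⟩, ?_⟩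
    simp only [Bool.and_eq_true, bne_iff_ne, ne_eq]
    refine ⟨?_, hcond⟩
    intro he
    have : kk = j := by omega
    subst this
    rw [fpiSsub_irrefl] at hcond
    exact absurd hcond (by simp)

-- ===== VERDICT (by name: the statement is the Claim_ definition above) =====
theorem filterPrimeImplicants_spec : Claim_equal_filterPrimeImplicants := by
  intro groups _
  rw [Spec_filterPrimeImplicants, filterPrimeImplicants, filterPrimeImplicants_alt]
  have hlen : (fpiSets groups).length = groups.length := by simp [fpiSets]
  have hnd : ∀ s ∈ fpiSets groups, s.Nodup := by
    intro s hs
    rcases List.mem_map.mp hs with ⟨g, _, rfl⟩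
    exact PySem.Set.nodup_ofList _
  apply PySem.List.foldl_congr_mem
  intro acc p hp
  rcases (PySem.List.mem_enumerate_iff _ _ _).mp hp with ⟨kk, hkk, rfl⟩
  have h1 := fpi_condA groups kk hkk
  have h2 := fpi_kp_contains (fpiSets groups) hnd kk (by omega)
  rw [← hlen]
  simp only [] at h1 h2 ⊢
  rw [h1, show ((0 : Int) + (kk : Nat)) = ((kk : Nat) : Int) by omega, h2]
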